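-- pv_equiv track=rewrite | github.com/greeshma-prabhu/marketing_tool | core/variant_generator.py | reorder_features_for_variant
-- ===== SOURCE A (Python) =====
-- from typing import List, Dict
--
-- def reorder_features_for_variant(features: List[str], variant_type: str) -> List[str]:
--     """
--     Reorder features based on variant type to emphasize different aspects.
--
--     variant_type: 'professional', 'emotional', 'technical'
--     """
--     if not features or len(features) < 2:
--         return features
--
--     # For professional: keep original order (business-first)
--     if variant_type == 'professional':
--         return features
--
--     # For emotional: prioritize benefits and user experience
--     if variant_type == 'emotional':
--         # Move features with emotional words to front
--         emotional_keywords = ['experience', 'feel', 'enjoy', 'love', 'comfort', 'style', 'beautiful']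
--         emotional_features = [f for f in features if any(kw in f.lower() for kw in emotional_keywords)]
--         other_features = [f for f in features if f not in emotional_features]
--         return emotional_features + other_features
--
--     # For technical: prioritize specs and technical details
--     if variant_type == 'technical':
--         technical_keywords = ['spec', 'performance', 'technology', 'advanced', 'power', 'speed', 'capacity']
--         technical_features = [f for f in features if any(kw in f.lower() for kw in technical_keywords)]
--         other_features = [f for f in features if f not in technical_features]
--         return technical_features + other_features
--
--     return features
-- ===== SOURCE B (Python) =====
-- _KEYWORDS = {
--     'emotional': ['experience', 'feel', 'enjoy', 'love', 'comfort', 'style', 'beautiful'],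
--     'technical': ['spec', 'performance', 'technology', 'advanced', 'power', 'speed', 'capacity'],
-- }
--
-- def reorder_features_for_variant(features, variant_type):
--     if not features or len(features) < 2:
--         return features
--     kws = _KEYWORDS.get(variant_type)
--     if kws is None:
--         return features
--     hit, miss = [], []
--     for f in features:
--         lf = f.lower()
--         (hit if any(kw in lf for kw in kws) else miss).append(f)
--     return hit + miss
-- ===== Notes on version B (the rewrite author's own statement) =====
-- stated objective: simpler
-- what changed: Replaced the two per-variant if-branches, each building a matched list by comprehension and then re-scanning the whole feature list with an O(n^2) 'not in' membership test, by a dict dispatch to the keyword list and a single pass that appends each feature to a hit or miss accumulator.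
import Mathlib
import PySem

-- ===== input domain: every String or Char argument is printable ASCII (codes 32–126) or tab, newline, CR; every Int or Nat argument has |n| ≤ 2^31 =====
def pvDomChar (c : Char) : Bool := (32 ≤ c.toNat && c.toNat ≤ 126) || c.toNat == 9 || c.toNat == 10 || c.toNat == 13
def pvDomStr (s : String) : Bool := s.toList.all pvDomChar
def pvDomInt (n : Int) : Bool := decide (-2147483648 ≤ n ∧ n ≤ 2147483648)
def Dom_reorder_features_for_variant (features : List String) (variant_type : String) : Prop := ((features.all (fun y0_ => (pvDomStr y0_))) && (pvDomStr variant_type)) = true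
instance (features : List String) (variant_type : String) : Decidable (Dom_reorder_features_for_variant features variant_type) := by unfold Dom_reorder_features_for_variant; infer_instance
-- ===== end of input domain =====

-- B replaces A's two per-variant branches (comprehension + quadratic 'not in' re-scan) by a
-- dict dispatch to the keyword list and one pass with hit/miss accumulators (objective: simpler).

-- ===== PORT A =====
-- 'any(kw in f.lower() for kw in kws)'
def pvAnyKw (kws : List String) (f : String) : Bool :=
  kws.any (fun kw => PySem.Str.isIn kw (PySem.Str.lower f))

def reorder_features_for_variant (features : List String) (variant_type : String) : List String :=
  if features = [] ∨ features.length < 2 then features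
  else if variant_type = "professional" then features
  else if variant_type = "emotional" then
    let emotional_keywords := ["experience", "feel", "enjoy", "love", "comfort", "style", "beautiful"]
    let emotional_features := features.filter (fun f => pvAnyKw emotional_keywords f)
    let other_features := features.filter (fun f => !(emotional_features.contains f))
    emotional_features ++ other_features
  else if variant_type = "technical" then
    let technical_keywords := ["spec", "performance", "technology", "advanced", "power", "speed", "capacity"]
    let technical_features := features.filter (fun f => pvAnyKw technical_keywords f)
    let other_features := features.filter (fun f => !(technical_features.contains f))
    technical_features ++ other_features
  else features

-- ===== PORT B =====
def pvKeywordTable : PySem.Dict String (List String) :=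
  PySem.Dict.ofList
    [("emotional", ["experience", "feel", "enjoy", "love", "comfort", "style", "beautiful"]),
     ("technical", ["spec", "performance", "technology", "advanced", "power", "speed", "capacity"])]

-- the single pass: append each feature to the hit or the miss accumulator
def pvSplitPass (kws : List String) : List String → List String × List String → List String × List String
  | [], acc => acc
  | f :: rest, acc =>
    if (kws.any (fun kw => PySem.Str.isIn kw (PySem.Str.lower f))) then
      pvSplitPass kws rest (acc.1 ++ [f], acc.2)
    else
      pvSplitPass kws rest (acc.1, acc.2 ++ [f])

def reorder_features_for_variant_alt (features : List String) (variant_type : String) : List String :=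
  if features = [] ∨ features.length < 2 then features
  else
    match PySem.Dict.get? pvKeywordTable variant_type with
    | none => features
    | some kws =>
      let p := pvSplitPass kws features ([], [])
      p.1 ++ p.2

-- ===== PRECONDITION & SPEC =====
def Spec_reorder_features_for_variant (features : List String) (variant_type : String) (out : List String) : Prop := out = reorder_features_for_variant_alt features variant_type
instance (features : List String) (variant_type : String) (out : List String) : Decidable (Spec_reorder_features_for_variant features variant_type out) := by unfold Spec_reorder_features_for_variant; infer_instance

-- ===== CLAIM (what is proved, stated in full; the proofs are below) =====
def Claim_equal_reorder_features_for_variant : Prop := ∀ (features : List String) (variant_type : String), Dom_reorder_features_for_variant features variant_type → Spec_reorder_features_for_variant features variant_type (reorder_features_for_variant features variant_type)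

-- ===== LEMMAS AND PROOFS =====

-- the single pass computes the two filters, appended to the accumulators
theorem pvSplitPass_eq (kws : List String) (fs : List String) (h m : List String) :
    pvSplitPass kws fs (h, m)
      = (h ++ fs.filter (fun f => kws.any (fun kw => PySem.Str.isIn kw (PySem.Str.lower f))),
         m ++ fs.filter (fun f => !(kws.any (fun kw => PySem.Str.isIn kw (PySem.Str.lower f))))) := by
  induction fs generalizing h m with
  | nil => simp [pvSplitPass]
  | cons f rest ih =>
    simp only [pvSplitPass, ih, List.filter_cons]
    by_cases hp : (kws.any fun kw => PySem.Str.isIn kw (PySem.Str.lower f)) = true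
    · rw [hp]; simp
    · rw [Bool.not_eq_true] at hp; rw [hp]; simp

-- A's 'f not in matched' re-scan equals the negated predicate, for f drawn from the same list
theorem pvOther_eq (p : String → Bool) (fs : List String) :
    fs.filter (fun f => !((fs.filter p).contains f)) = fs.filter (fun f => !(p f)) := by
  apply List.filter_congr
  intro f hf
  by_cases hp : p f = true
  · simp [List.mem_filter, hf, hp]
  · simp only [Bool.not_eq_true] at hp
    simp [List.mem_filter, hp]

-- ===== VERDICT (by name: the statement is the Claim_ definition above) =====
theorem reorder_features_for_variant_spec : Claim_equal_reorder_features_for_variant := by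
  intro features variant_type _
  unfold Spec_reorder_features_for_variant
  unfold reorder_features_for_variant reorder_features_for_variant_alt
  by_cases hg : features = [] ∨ features.length < 2
  · rw [if_pos hg, if_pos hg]
  · rw [if_neg hg, if_neg hg]
    by_cases h1 : variant_type = "professional"
    · subst h1
      rw [if_pos rfl, show PySem.Dict.get? pvKeywordTable "professional" = none from by decide]
    · by_cases h2 : variant_type = "emotional"
      · subst h2
        rw [if_neg h1, if_pos rfl,
          show PySem.Dict.get? pvKeywordTable "emotional"
            = some ["experience", "feel", "enjoy", "love", "comfort", "style", "beautiful"] from by decide]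
        simp only [pvSplitPass_eq, List.nil_append, pvAnyKw]
        rw [pvOther_eq]
      · by_cases h3 : variant_type = "technical"
        · subst h3
          rw [if_neg h1, if_neg h2, if_pos rfl,
            show PySem.Dict.get? pvKeywordTable "technical"
              = some ["spec", "performance", "technology", "advanced", "power", "speed", "capacity"] from by decide]
          simp only [pvSplitPass_eq, List.nil_append, pvAnyKw]
          rw [pvOther_eq]
        · rw [if_neg h1, if_neg h2, if_neg h3]
          have hnone : PySem.Dict.get? pvKeywordTable variant_type = none := by
            simp only [PySem.Dict.get?,
              show pvKeywordTable.items
                = [("emotional", ["experience", "feel", "enjoy", "love", "comfort", "style", "beautiful"]),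
                   ("technical", ["spec", "performance", "technology", "advanced", "power", "speed", "capacity"])]
              from by decide, List.find?]
            rw [beq_eq_false_iff_ne.mpr (fun h => h2 h.symm),
              beq_eq_false_iff_ne.mpr (fun h => h3 h.symm)]
            rfl
          rw [hnone]
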